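-- pv_equiv track=rewrite | github.com/rakaarwaky/PsdTimelapse | engine/tools/auto_fixer/executors/import_order_fixer.py | _fix_import_order
-- ===== SOURCE A (Python) =====
-- def _fix_import_order(content: str) -> str:
--     """Reorganize imports to proper order."""
--     lines = content.splitlines()
--
--     # Collect different types of content
--     docstring_lines: list[str] = []
--     future_imports: list[str] = []
--     regular_imports: list[str] = []
--     other_lines: list[str] = []
--
--     in_docstring = False
--     docstring_done = False
--
--     for i, line in enumerate(lines):
--         stripped = line.strip()
--
--         # Handle docstrings at the start
--         if not docstring_done:
--             if stripped.startswith('"""') or stripped.startswith("'''"):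
--                 in_docstring = (
--                     not in_docstring or stripped.count('"""') >= 2 or stripped.count("'''") >= 2
--                 )
--                 docstring_lines.append(line)
--                 if not in_docstring:
--                     docstring_done = True
--                 continue
--             elif in_docstring:
--                 docstring_lines.append(line)
--                 continue
--             elif stripped == "":
--                 docstring_lines.append(line)
--                 continue
--             else:
--                 docstring_done = True
--
--         # Categorize imports
--         if stripped.startswith("from __future__ import"):
--             future_imports.append(line)
--         elif stripped.startswith("import ") or stripped.startswith("from "):
--             regular_imports.append(line)
--         else:
--             other_lines.append(line)
--
--     # Rebuild file
--     result_lines = docstring_lines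
--
--     if future_imports:
--         result_lines.extend(future_imports)
--         result_lines.append("")
--
--     if regular_imports:
--         result_lines.extend(regular_imports)
--         result_lines.append("")
--
--     result_lines.extend(other_lines)
--
--     return "\n".join(result_lines)
-- ===== SOURCE B (Python) =====
-- def _category(line):
--     s = line.strip()
--     if s.startswith("from __future__ import"):
--         return 1
--     if s.startswith("import ") or s.startswith("from "):
--         return 2
--     return 3
--
--
-- def _fix_import_order(content: str) -> str:
--     lines = content.splitlines()
--
--     # Phase 1: index of the first body line (same docstring/blank toggle as the original).
--     i = 0
--     in_docstring = False
--     while i < len(lines):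
--         s = lines[i].strip()
--         if s.startswith('"""') or s.startswith("'''"):
--             in_docstring = (
--                 not in_docstring or s.count('"""') >= 2 or s.count("'''") >= 2
--             )
--             i += 1
--             if not in_docstring:
--                 break
--         elif in_docstring or s == "":
--             i += 1
--         else:
--             break
--
--     # Phase 2: stable sort of the body by category (1=future, 2=import, 3=other),
--     # then one scan inserting a blank line at each boundary after categories 1 and 2.
--     result = lines[:i]
--     prev = None
--     for line in sorted(lines[i:], key=_category):
--         c = _category(line)
--         if prev in (1, 2) and c != prev:
--             result.append("")
--         result.append(line)
--         prev = c
--     if prev in (1, 2):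
--         result.append("")
--     return "\n".join(result)
-- ===== Notes on version B (the rewrite author's own statement) =====
-- stated objective: alternative
-- what changed: Instead of bucketing lines into three lists during one stateful loop, B computes the docstring-prefix boundary index, stable-sorts the remaining lines by a category key (future=1, import=2, other=3), and emits the sorted sequence in one scan that inserts a blank line at category boundaries after the import blocks.
import Mathlib
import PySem

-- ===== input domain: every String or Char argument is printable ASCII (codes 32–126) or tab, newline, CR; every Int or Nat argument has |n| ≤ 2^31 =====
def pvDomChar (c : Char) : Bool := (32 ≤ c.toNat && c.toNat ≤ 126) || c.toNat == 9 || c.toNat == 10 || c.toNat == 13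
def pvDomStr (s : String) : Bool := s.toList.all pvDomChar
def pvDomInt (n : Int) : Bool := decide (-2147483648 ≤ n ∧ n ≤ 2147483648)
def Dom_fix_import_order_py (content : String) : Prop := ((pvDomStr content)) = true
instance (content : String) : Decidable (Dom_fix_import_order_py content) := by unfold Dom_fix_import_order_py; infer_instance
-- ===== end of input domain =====

-- B replaces A's three bucket lists by a boundary index + a stable sort of the body under a
-- category key + a single separator-inserting scan (alternative algorithm, same observable output).

-- ===== PORT A =====
-- A's loop: state (docstring_lines, future, regular, other, in_docstring, docstring_done)
def pvALoop : List String → List String → List String → List String → List String → Bool → Bool →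
    List String × List String × List String × List String
  | [], ds, fu, re, ot, _, _ => (ds, fu, re, ot)
  | line :: rest, ds, fu, re, ot, in_d, done =>
    let s := PySem.Str.strip line
    if !done && (PySem.Str.startswith s "\"\"\"" || PySem.Str.startswith s "'''") then
      let in_d' := !in_d || decide (2 ≤ PySem.Str.count s "\"\"\"") || decide (2 ≤ PySem.Str.count s "'''")
      pvALoop rest (ds ++ [line]) fu re ot in_d' (if !in_d' then true else done)
    else if !done && in_d then
      pvALoop rest (ds ++ [line]) fu re ot in_d done
    else if !done && (s == "") then
      pvALoop rest (ds ++ [line]) fu re ot in_d done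
    else
      -- docstring_done := True (falls through to classification in the same iteration)
      if PySem.Str.startswith s "from __future__ import" then
        pvALoop rest ds (fu ++ [line]) re ot in_d true
      else if PySem.Str.startswith s "import " || PySem.Str.startswith s "from " then
        pvALoop rest ds fu (re ++ [line]) ot in_d true
      else
        pvALoop rest ds fu re (ot ++ [line]) in_d true

def fix_import_order_py (content : String) : String :=
  let lines := PySem.Str.splitlines content
  let r := pvALoop lines [] [] [] [] false false
  let ds := r.1; let fu := r.2.1; let re := r.2.2.1; let ot := r.2.2.2
  let r1 := if fu = [] then ds else ds ++ fu ++ [""]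
  let r2 := if re = [] then r1 else r1 ++ re ++ [""]
  PySem.Str.join "\n" (r2 ++ ot)

-- ===== PORT B =====
-- _category: 1 = future import, 2 = other import, 3 = everything else
def pvCat (line : String) : Nat :=
  if PySem.Str.startswith (PySem.Str.strip line) "from __future__ import" then 1
  else if PySem.Str.startswith (PySem.Str.strip line) "import "
       || PySem.Str.startswith (PySem.Str.strip line) "from " then 2
  else 3

-- phase 1: index of the first body line (same docstring/blank toggle as A)
def pvBoundary : List String → Bool → Nat
  | [], _ => 0
  | line :: rest, in_d =>
    let s := PySem.Str.strip line
    if PySem.Str.startswith s "\"\"\"" || PySem.Str.startswith s "'''" then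
      let in_d' := !in_d || decide (2 ≤ PySem.Str.count s "\"\"\"") || decide (2 ≤ PySem.Str.count s "'''")
      if !in_d' then 1 else pvBoundary rest in_d' + 1
    else if in_d || s == "" then pvBoundary rest in_d + 1
    else 0

-- phase 2 scan: emit the sorted lines, inserting "" at category boundaries after categories 1 and 2
def pvEmit : List String → List String → Option Nat → List String
  | [], acc, prev => if prev = some 1 ∨ prev = some 2 then acc ++ [""] else acc
  | line :: rest, acc, prev =>
    let c := pvCat line
    let acc' := if (prev = some 1 ∨ prev = some 2) ∧ prev ≠ some c then acc ++ [""] else acc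
    pvEmit rest (acc' ++ [line]) (some c)

def fix_import_order_py_alt (content : String) : String :=
  let lines := PySem.Str.splitlines content
  let k := pvBoundary lines false
  PySem.Str.join "\n" (pvEmit (PySem.List.sorted (lines.drop k) pvCat false) (lines.take k) none)

-- ===== PRECONDITION & SPEC =====
def Spec_fix_import_order_py (content : String) (out : String) : Prop := out = fix_import_order_py_alt content
instance (content : String) (out : String) : Decidable (Spec_fix_import_order_py content out) := by unfold Spec_fix_import_order_py; infer_instance

-- ===== CLAIM (what is proved, stated in full; the proofs are below) =====
def Claim_equal_fix_import_order_py : Prop := ∀ (content : String), Dom_fix_import_order_py content → Spec_fix_import_order_py content (fix_import_order_py content)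

-- ===== LEMMAS AND PROOFS =====

theorem pvCat_cases (l : String) : pvCat l = 1 ∨ pvCat l = 2 ∨ pvCat l = 3 := by
  unfold pvCat; split_ifs <;> simp

-- insertBy walks past a block every element of which refuses `before`
theorem pvInsertBy_skip (bef : String → String → Bool) (x : String) (l t : List String)
    (h : ∀ y ∈ l, bef x y = false) :
    PySem.List.insertBy bef x (l ++ t) = l ++ PySem.List.insertBy bef x t := by
  induction l with
  | nil => simp
  | cons y l' ih =>
    simp [PySem.List.insertBy, h y (by simp)]
    exact ih (fun z hz => h z (by simp [hz]))

-- inserting into b1++b2++b3 (categories 1/2/3) appends x at the end of its own block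
theorem pvIns1 (x : String) (b1 b2 b3 : List String) (hx : pvCat x = 1)
    (h1 : ∀ y ∈ b1, pvCat y = 1) (h2 : ∀ y ∈ b2, pvCat y = 2) (h3 : ∀ y ∈ b3, pvCat y = 3) :
    PySem.List.insertBy (fun a b => decide (pvCat a < pvCat b)) x (b1 ++ b2 ++ b3) =
      (b1 ++ [x]) ++ b2 ++ b3 := by
  rw [List.append_assoc, pvInsertBy_skip _ _ b1 _ (fun y hy => by simp [hx, h1 y hy])]
  cases b2 with
  | cons y l2 => simp [PySem.List.insertBy, hx, h2 y (by simp)]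
  | nil =>
    cases b3 with
    | cons z l3 => simp [PySem.List.insertBy, hx, h3 z (by simp)]
    | nil => simp [PySem.List.insertBy]

theorem pvIns2 (x : String) (b1 b2 b3 : List String) (hx : pvCat x = 2)
    (h1 : ∀ y ∈ b1, pvCat y = 1) (h2 : ∀ y ∈ b2, pvCat y = 2) (h3 : ∀ y ∈ b3, pvCat y = 3) :
    PySem.List.insertBy (fun a b => decide (pvCat a < pvCat b)) x (b1 ++ b2 ++ b3) =
      b1 ++ (b2 ++ [x]) ++ b3 := by
  rw [pvInsertBy_skip _ _ (b1 ++ b2) _ (fun y hy => by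
    rcases List.mem_append.1 hy with h | h
    · simp [hx, h1 y h]
    · simp [hx, h2 y h])]
  cases b3 with
  | cons z l3 => simp [PySem.List.insertBy, hx, h3 z (by simp)]
  | nil => simp [PySem.List.insertBy]

theorem pvIns3 (x : String) (b1 b2 b3 : List String) (hx : pvCat x = 3)
    (h1 : ∀ y ∈ b1, pvCat y = 1) (h2 : ∀ y ∈ b2, pvCat y = 2) (h3 : ∀ y ∈ b3, pvCat y = 3) :
    PySem.List.insertBy (fun a b => decide (pvCat a < pvCat b)) x (b1 ++ b2 ++ b3) =
      b1 ++ b2 ++ (b3 ++ [x]) := by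
  have := PySem.List.insertBy_of_forall_not_before (fun a b => decide (pvCat a < pvCat b)) x
    (b1 ++ b2 ++ b3) (fun y hy => by
      rcases List.mem_append.1 hy with h | h
      · rcases List.mem_append.1 h with h | h
        · simp [hx, h1 y h]
        · simp [hx, h2 y h]
      · simp [hx, h3 y h])
  rw [this]; simp

-- the insertion-sort fold keeps the three blocks grouped and stable
theorem pvFold (xs : List String) : ∀ b1 b2 b3 : List String,
    (∀ y ∈ b1, pvCat y = 1) → (∀ y ∈ b2, pvCat y = 2) → (∀ y ∈ b3, pvCat y = 3) →
    xs.foldl (fun acc x => PySem.List.insertBy (fun a b => decide (pvCat a < pvCat b)) x acc)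
        (b1 ++ b2 ++ b3) =
      (b1 ++ xs.filter (fun l => pvCat l == 1)) ++ (b2 ++ xs.filter (fun l => pvCat l == 2)) ++
        (b3 ++ xs.filter (fun l => pvCat l == 3)) := by
  induction xs with
  | nil => intro b1 b2 b3 _ _ _; simp
  | cons x rest ih =>
    intro b1 b2 b3 h1 h2 h3
    simp only [List.foldl_cons, List.filter_cons]
    rcases pvCat_cases x with hx | hx | hx
    · rw [pvIns1 x b1 b2 b3 hx h1 h2 h3,
        ih (b1 ++ [x]) b2 b3 (fun y hy => by
          rcases List.mem_append.1 hy with h | h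
          · exact h1 y h
          · simp at h; subst h; exact hx) h2 h3]
      simp [hx, List.append_assoc]
    · rw [pvIns2 x b1 b2 b3 hx h1 h2 h3,
        ih b1 (b2 ++ [x]) b3 h1 (fun y hy => by
          rcases List.mem_append.1 hy with h | h
          · exact h2 y h
          · simp at h; subst h; exact hx) h3]
      simp [hx, List.append_assoc]
    · rw [pvIns3 x b1 b2 b3 hx h1 h2 h3,
        ih b1 b2 (b3 ++ [x]) h1 h2 (fun y hy => by
          rcases List.mem_append.1 hy with h | h
          · exact h3 y h
          · simp at h; subst h; exact hx)]
      simp [hx, List.append_assoc]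

-- sorted(body, key=_category) is exactly the three stable filter blocks
theorem pvSorted_eq (xs : List String) :
    PySem.List.sorted xs pvCat false =
      xs.filter (fun l => pvCat l == 1) ++ xs.filter (fun l => pvCat l == 2) ++
        xs.filter (fun l => pvCat l == 3) := by
  rw [PySem.List.sorted_eq_foldl_insertBy]
  simpa using pvFold xs [] [] [] (by simp) (by simp) (by simp)

-- the scan never inserts a separator inside a constant-category block
theorem pvEmit_block (l : List String) : ∀ (c : Nat) (t acc : List String),
    (∀ y ∈ l, pvCat y = c) → pvEmit (l ++ t) acc (some c) = pvEmit t (acc ++ l) (some c) := by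
  induction l with
  | nil => intro c t acc _; simp
  | cons y l' ih =>
    intro c t acc h
    have hy := h y (by simp)
    simp only [List.cons_append, pvEmit, hy]
    rw [if_neg (by simp)]
    simpa [List.append_assoc] using ih c t (acc ++ [y]) (fun z hz => h z (by simp [hz]))

-- a trailing all-other block: no separators inside, no trailing blank
theorem pvEmit_f3_none (f3 : List String) (acc : List String) (h3 : ∀ y ∈ f3, pvCat y = 3) :
    pvEmit f3 acc none = acc ++ f3 := by
  cases f3 with
  | nil => simp [pvEmit]
  | cons z l3 =>
    have hz := h3 z (by simp)
    simp only [pvEmit, hz]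
    rw [if_neg (by simp)]
    rw [show l3 = l3 ++ [] by simp, pvEmit_block l3 3 [] (acc ++ [z]) (fun y hy => h3 y (by simp [hy]))]
    simp [pvEmit]

-- after an import block (prev = 1 or 2), an all-other block gets exactly one leading blank
theorem pvEmit_f3_sep (f3 : List String) (acc : List String) (prev : Option Nat)
    (h3 : ∀ y ∈ f3, pvCat y = 3) (hp : prev = some 1 ∨ prev = some 2) :
    pvEmit f3 acc prev = acc ++ [""] ++ f3 := by
  cases f3 with
  | nil => rcases hp with hp | hp <;> subst hp <;> simp [pvEmit]
  | cons z l3 =>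
    have hz := h3 z (by simp)
    simp only [pvEmit, hz]
    rw [if_pos (by rcases hp with hp | hp <;> subst hp <;> simp)]
    rw [show l3 = l3 ++ [] by simp, pvEmit_block l3 3 [] (acc ++ [""] ++ [z]) (fun y hy => h3 y (by simp [hy]))]
    simp [pvEmit, List.append_assoc]

-- the regular-import block then the other block, starting right after the future block
theorem pvEmit_f23_one (f2 f3 : List String) (acc : List String)
    (h2 : ∀ y ∈ f2, pvCat y = 2) (h3 : ∀ y ∈ f3, pvCat y = 3) :
    pvEmit (f2 ++ f3) acc (some 1) =
      acc ++ [""] ++ (if f2 = [] then [] else f2 ++ [""]) ++ f3 := by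
  cases f2 with
  | nil => simpa using pvEmit_f3_sep f3 acc (some 1) h3 (Or.inl rfl)
  | cons y l2 =>
    have hy := h2 y (by simp)
    simp only [List.cons_append, pvEmit, hy]
    rw [if_pos (by simp)]
    rw [show l2 ++ f3 = l2 ++ f3 by rfl, pvEmit_block l2 2 f3 (acc ++ [""] ++ [y])
      (fun z hz => h2 z (by simp [hz]))]
    rw [pvEmit_f3_sep f3 _ (some 2) h3 (Or.inr rfl)]
    simp [List.append_assoc]

-- the same two blocks with no docstring-side predecessor
theorem pvEmit_f23 (f2 f3 : List String) (acc : List String)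
    (h2 : ∀ y ∈ f2, pvCat y = 2) (h3 : ∀ y ∈ f3, pvCat y = 3) :
    pvEmit (f2 ++ f3) acc none =
      acc ++ (if f2 = [] then [] else f2 ++ [""]) ++ f3 := by
  cases f2 with
  | nil => simpa using pvEmit_f3_none f3 acc h3
  | cons y l2 =>
    have hy := h2 y (by simp)
    simp only [List.cons_append, pvEmit, hy]
    rw [if_neg (by simp)]
    rw [pvEmit_block l2 2 f3 (acc ++ [y]) (fun z hz => h2 z (by simp [hz]))]
    rw [pvEmit_f3_sep f3 _ (some 2) h3 (Or.inr rfl)]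
    simp [List.append_assoc]

-- the scan over the three blocks produces A's assembled shape
theorem pvEmit_full (f1 f2 f3 acc : List String)
    (h1 : ∀ y ∈ f1, pvCat y = 1) (h2 : ∀ y ∈ f2, pvCat y = 2) (h3 : ∀ y ∈ f3, pvCat y = 3) :
    pvEmit (f1 ++ f2 ++ f3) acc none =
      acc ++ (if f1 = [] then [] else f1 ++ [""]) ++ (if f2 = [] then [] else f2 ++ [""]) ++ f3 := by
  cases f1 with
  | nil => simpa using pvEmit_f23 f2 f3 acc h2 h3
  | cons x l1 =>
    have hx := h1 x (by simp)
    simp only [List.cons_append, pvEmit, hx]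
    rw [if_neg (by simp)]
    rw [show l1 ++ f2 ++ f3 = l1 ++ (f2 ++ f3) by simp, pvEmit_block l1 1 (f2 ++ f3) (acc ++ [x])
      (fun y hy => h1 y (by simp [hy]))]
    rw [pvEmit_f23_one f2 f3 (acc ++ [x] ++ l1) h2 h3]
    simp [List.append_assoc]

-- once docstring_done, A's loop is a pure three-way classification
theorem pvALoop_done (lines : List String) : ∀ (ds fu re ot : List String) (in_d : Bool),
    pvALoop lines ds fu re ot in_d true =
      (ds, fu ++ lines.filter (fun l => pvCat l == 1),
           re ++ lines.filter (fun l => pvCat l == 2),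
           ot ++ lines.filter (fun l => pvCat l == 3)) := by
  induction lines with
  | nil => intro ds fu re ot in_d; simp [pvALoop]
  | cons line rest ih =>
    intro ds fu re ot in_d
    by_cases h1 : PySem.Chars.startswith (PySem.Chars.strip line.toList) ['f', 'r', 'o', 'm', ' ', '_', '_', 'f', 'u', 't', 'u', 'r', 'e', '_', '_', ' ', 'i', 'm', 'p', 'o', 'r', 't'] = true <;>
      by_cases h2 : PySem.Chars.startswith (PySem.Chars.strip line.toList) ['i', 'm', 'p', 'o', 'r', 't', ' '] = true <;>
      by_cases h3 : PySem.Chars.startswith (PySem.Chars.strip line.toList) ['f', 'r', 'o', 'm', ' '] = true <;>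
      simp [pvALoop, h1, h2, h3, ih, pvCat]

-- before docstring_done, A's loop = take/drop at B's boundary, then classification
set_option maxHeartbeats 2000000 in
theorem pvALoop_eq (lines : List String) : ∀ (ds fu re ot : List String) (in_d : Bool),
    pvALoop lines ds fu re ot in_d false =
      (ds ++ lines.take (pvBoundary lines in_d),
       fu ++ (lines.drop (pvBoundary lines in_d)).filter (fun l => pvCat l == 1),
       re ++ (lines.drop (pvBoundary lines in_d)).filter (fun l => pvCat l == 2),
       ot ++ (lines.drop (pvBoundary lines in_d)).filter (fun l => pvCat l == 3)) := by
  induction lines with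
  | nil => intro ds fu re ot in_d; simp [pvALoop, pvBoundary]
  | cons line rest ih =>
    intro ds fu re ot in_d
    cases in_d <;>
      by_cases hq1 : PySem.Chars.startswith (PySem.Chars.strip line.toList) ['\"', '\"', '\"'] = true <;>
      by_cases hq2 : PySem.Chars.startswith (PySem.Chars.strip line.toList) ['\'', '\'', '\''] = true <;>
      by_cases c1 : 2 ≤ PySem.Chars.count (PySem.Chars.strip line.toList) ['\"', '\"', '\"'] <;>
      by_cases c2 : 2 ≤ PySem.Chars.count (PySem.Chars.strip line.toList) ['\'', '\'', '\''] <;>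
      by_cases hb : PySem.Str.strip line = "" <;>
      by_cases h1 : PySem.Chars.startswith (PySem.Chars.strip line.toList) ['f', 'r', 'o', 'm', ' ', '_', '_', 'f', 'u', 't', 'u', 'r', 'e', '_', '_', ' ', 'i', 'm', 'p', 'o', 'r', 't'] = true <;>
      by_cases h2 : PySem.Chars.startswith (PySem.Chars.strip line.toList) ['i', 'm', 'p', 'o', 'r', 't', ' '] = true <;>
      by_cases h3 : PySem.Chars.startswith (PySem.Chars.strip line.toList) ['f', 'r', 'o', 'm', ' '] = true <;>
      simp [pvALoop, pvBoundary, hq1, hq2, c1, c2, hb, h1, h2, h3, ih, pvALoop_done, pvCat] <;>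
      simp_all [PySem.Chars.startswith]

-- ===== VERDICT (by name: the statement is the Claim_ definition above) =====
theorem fix_import_order_py_spec : Claim_equal_fix_import_order_py := by
  intro content _
  unfold Spec_fix_import_order_py fix_import_order_py fix_import_order_py_alt
  simp only [pvALoop_eq, List.nil_append, pvSorted_eq]
  rw [pvEmit_full _ _ _ _ (by simp [List.mem_filter]) (by simp [List.mem_filter]) (by simp [List.mem_filter])]
  split_ifs <;> simp [List.append_assoc]
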